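-- pv_equiv track=rewrite | github.com/WilBtc/InsaAutomationCorp | insa-crm-platform/core/agents/modules/cron_monitor.py | _expand_schedule
-- ===== SOURCE A (Python) =====
-- from typing import Dict, List, Optional
--
-- def _expand_schedule(schedule: str) -> List[str]:
--     """
--     Expand cron schedule to time slots
--     */5 * * * * → ['00', '05', '10', '15', ...]
--     """
--     parts = schedule.split()
--     if len(parts) < 2:
--         return []
--
--     minute = parts[0]
--     hour = parts[1]
--
--     # Simple expansion (minute only)
--     if minute.startswith('*/'):
--         interval = int(minute[2:])
--         return [f"{h:02d}:{m:02d}" for h in range(24) for m in range(0, 60, interval)]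
--     elif minute.isdigit():
--         if hour.isdigit():
--             return [f"{int(hour):02d}:{int(minute):02d}"]
--         else:
--             return [f"{h:02d}:{int(minute):02d}" for h in range(24)]
--
--     return []
-- ===== SOURCE B (Python) =====
-- from typing import List
--
--
-- def _expand_schedule(schedule: str) -> List[str]:
--     """Filter the full 24x60 day grid through match predicates derived from
--     the minute and hour fields, instead of constructing range products."""
--     parts = schedule.split()
--     if len(parts) < 2:
--         return []
--
--     minute = parts[0]
--     hour = parts[1]
--
--     if minute.startswith('*/'):
--         interval = int(minute[2:])
--         minute_ok = lambda m: interval > 0 and m % interval == 0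
--         hour_ok = lambda h: True
--     elif minute.isdigit():
--         minute_ok = lambda m: m == int(minute)
--         hour_ok = (lambda h: h == int(hour)) if hour.isdigit() else (lambda h: True)
--     else:
--         return []
--
--     return [f"{h:02d}:{m:02d}"
--             for h in range(24) for m in range(60)
--             if hour_ok(h) and minute_ok(m)]
-- ===== Notes on version B (the rewrite author's own statement) =====
-- stated objective: alternative
-- what changed: B derives a minute-match and an hour-match predicate from the two cron fields and filters the full 24x60 grid of day slots through them in one comprehension, instead of A's three branches that construct range products; Pre_ excludes only inputs where A raises (a star-slash minute whose interval part is not an integer literal, where B raises identically, or is zero, where B returns []).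
-- intended difference: On schedules whose digit fields lie outside cron range (minute >= 60, or a digit hour >= 24) A returns impossible time slots naming the out-of-range field while B returns [], the intended reading of a schedule matching no slot of the day. — e.g. on _expand_schedule("5 99"): A returns ["99:05"], B returns []
import Mathlib
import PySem

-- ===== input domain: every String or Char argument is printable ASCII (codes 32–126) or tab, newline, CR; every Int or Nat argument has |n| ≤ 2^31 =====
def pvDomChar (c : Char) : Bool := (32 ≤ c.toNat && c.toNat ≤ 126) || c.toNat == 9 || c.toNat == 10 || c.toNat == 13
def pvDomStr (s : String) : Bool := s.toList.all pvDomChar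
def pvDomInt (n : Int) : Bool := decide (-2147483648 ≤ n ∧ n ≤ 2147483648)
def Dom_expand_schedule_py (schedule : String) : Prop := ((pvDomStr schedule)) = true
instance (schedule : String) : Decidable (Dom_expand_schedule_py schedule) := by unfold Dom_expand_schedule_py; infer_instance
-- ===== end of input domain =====

-- B filters the full 24x60 day grid through match predicates instead of constructing range
-- products; equality of the RETURN values is proved outside D_ (digit fields out of cron range).

-- f"{n:02d}" as a list of chars (all values formatted here are nonnegative)
def pvFmt2 (n : Int) : List Char :=
  let cs := PySem.Int.toChars n
  if cs.length < 2 then '0' :: cs else cs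

-- ===== PORT A =====
def expand_schedule_py (schedule : String) : List String :=
  let parts := PySem.Str.split₀ schedule
  if parts.length < 2 then []
  else
    let minute := parts.getD 0 ""
    let hour := parts.getD 1 ""
    if PySem.Str.startswith minute "*/" then
      match PySem.Int.ofStr? (PySem.Str.slice minute (some 2) none) with
      | none => []        -- int() raises ValueError: excluded by Pre_
      | some interval =>
        -- range(0, 60, 0) raises ValueError in Python: excluded by Pre_ (pyRange is total)
        (PySem.List.pyRange 0 24 1).flatMap (fun h =>
          (PySem.List.pyRange 0 60 interval).map (fun m =>
            String.ofList (pvFmt2 h ++ ':' :: pvFmt2 m)))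
    else if PySem.Str.strIsdigit minute then
      if PySem.Str.strIsdigit hour then
        [String.ofList (pvFmt2 ((PySem.Int.ofStr? hour).getD 0) ++ ':' ::
                    pvFmt2 ((PySem.Int.ofStr? minute).getD 0))]
      else
        (PySem.List.pyRange 0 24 1).map (fun h =>
          String.ofList (pvFmt2 h ++ ':' :: pvFmt2 ((PySem.Int.ofStr? minute).getD 0)))
    else []

-- ===== PORT B =====
-- the one grid comprehension of Source B: every (h, m) of the day, kept if both predicates match
def pvGrid (hok : Int → Bool) (mok : Int → Bool) : List String :=
  (PySem.List.pyRange 0 24 1).flatMap (fun h =>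
    ((PySem.List.pyRange 0 60 1).filter (fun m => hok h && mok m)).map (fun m =>
      String.ofList (pvFmt2 h ++ ':' :: pvFmt2 m)))

def expand_schedule_py_alt (schedule : String) : List String :=
  let parts := PySem.Str.split₀ schedule
  if parts.length < 2 then []
  else
    let minute := parts.getD 0 ""
    let hour := parts.getD 1 ""
    if PySem.Str.startswith minute "*/" then
      match PySem.Int.ofStr? (PySem.Str.slice minute (some 2) none) with
      | none => []        -- int() raises ValueError: excluded by Pre_ (B raises identically)
      | some interval =>
        pvGrid (fun _ => true)
               (fun m => decide (0 < interval) && decide (PySem.Int.mod m interval = 0))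
    else if PySem.Str.strIsdigit minute then
      if PySem.Str.strIsdigit hour then
        pvGrid (fun h => decide (h = (PySem.Int.ofStr? hour).getD 0))
               (fun m => decide (m = (PySem.Int.ofStr? minute).getD 0))
      else
        pvGrid (fun _ => true) (fun m => decide (m = (PySem.Int.ofStr? minute).getD 0))
    else []

-- ===== PRECONDITION & SPEC =====
-- Pre_ excludes exactly the inputs where A raises ValueError: a star-slash minute field whose
-- interval part is not an int literal (there B raises identically) or parses to zero (there B returns []).
def Pre_expand_schedule_py (schedule : String) : Prop :=
  ¬ (2 ≤ (PySem.Str.split₀ schedule).length ∧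
     PySem.Str.startswith ((PySem.Str.split₀ schedule).getD 0 "") "*/" = true ∧
     (PySem.Int.ofStr? (PySem.Str.slice ((PySem.Str.split₀ schedule).getD 0 "") (some 2) none) = none ∨
      PySem.Int.ofStr? (PySem.Str.slice ((PySem.Str.split₀ schedule).getD 0 "") (some 2) none) = some 0))

instance (schedule : String) : Decidable (Pre_expand_schedule_py schedule) := by
  unfold Pre_expand_schedule_py; infer_instance

def pvWitness_expand_schedule_py : String := "*/15 * * * *"

-- On inputs whose minute and hour fields are digits outside the cron range (minute ≥ 60, or
-- hour ≥ 24), A returns impossible time slots naming the out-of-range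
-- field while B returns [] (no slot of the day matches), the intended reading.
def D_expand_schedule_py (schedule : String) : Prop :=
  2 ≤ (PySem.Str.split₀ schedule).length ∧
  PySem.Str.startswith ((PySem.Str.split₀ schedule).getD 0 "") "*/" = false ∧
  PySem.Str.strIsdigit ((PySem.Str.split₀ schedule).getD 0 "") = true ∧
  (60 ≤ (PySem.Int.ofStr? ((PySem.Str.split₀ schedule).getD 0 "")).getD 0 ∨
   (PySem.Str.strIsdigit ((PySem.Str.split₀ schedule).getD 1 "") = true ∧
    24 ≤ (PySem.Int.ofStr? ((PySem.Str.split₀ schedule).getD 1 "")).getD 0))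

instance (schedule : String) : Decidable (D_expand_schedule_py schedule) := by
  unfold D_expand_schedule_py; infer_instance

def Spec_expand_schedule_py (schedule : String) (out : List String) : Prop :=
  ¬ D_expand_schedule_py schedule → out = expand_schedule_py_alt schedule
instance (schedule : String) (out : List String) : Decidable (Spec_expand_schedule_py schedule out) := by
  unfold Spec_expand_schedule_py; infer_instance

def pvDiffWitness_expand_schedule_py : String := "5 99"
def pvDiffWitnessOut_expand_schedule_py : (List String) × (List String) := (["99:05"], [])

-- ===== CLAIM (what is proved, stated in full; the proofs are below) =====
def Claim_unchanged_expand_schedule_py : Prop := ∀ (schedule : String), Dom_expand_schedule_py schedule → Pre_expand_schedule_py schedule → Spec_expand_schedule_py schedule (expand_schedule_py schedule)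
def Claim_changed_expand_schedule_py : Prop := Dom_expand_schedule_py (pvDiffWitness_expand_schedule_py) ∧ Pre_expand_schedule_py (pvDiffWitness_expand_schedule_py) ∧ D_expand_schedule_py (pvDiffWitness_expand_schedule_py) ∧ expand_schedule_py (pvDiffWitness_expand_schedule_py) = pvDiffWitnessOut_expand_schedule_py.1 ∧ expand_schedule_py_alt (pvDiffWitness_expand_schedule_py) = pvDiffWitnessOut_expand_schedule_py.2 ∧ pvDiffWitnessOut_expand_schedule_py.1 ≠ pvDiffWitnessOut_expand_schedule_py.2
def Claim_exact_expand_schedule_py : Prop := ∀ (schedule : String), Dom_expand_schedule_py schedule → Pre_expand_schedule_py schedule → D_expand_schedule_py schedule → expand_schedule_py schedule ≠ expand_schedule_py_alt schedule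
-- ===== LEMMAS AND PROOFS =====

-- a digit character is not int()-strippable whitespace
theorem pv_notSpace (c : Char) (h : PySem.Chars.isdigit c = true) :
    PySem.Int.isIntSpace c = false := by
  simp [PySem.Chars.isdigit, Char.le_def, UInt32.le_iff_toNat_le] at h
  simp [PySem.Int.isIntSpace, Char.ext_iff, UInt32.ext_iff]
  omega

theorem pv_nonneg_shape (o : Option Nat) :
    0 ≤ (Option.map (fun n : ℤ => n) (do let a ← o; pure ((a : Nat) : ℤ))).getD 0 := by
  cases o <;> simp

-- int() of an all-digit string is never negative (default 0 included)
theorem pv_digits_nonneg (cs : List Char) (h : PySem.Chars.strIsdigit cs = true) :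
    0 ≤ (PySem.Int.ofChars? cs).getD 0 := by
  simp [PySem.Chars.strIsdigit] at h
  obtain ⟨hne, hall⟩ := h
  obtain ⟨c, t, rfl⟩ := List.exists_cons_of_ne_nil hne
  have hd : PySem.Chars.isdigit c = true := hall c (by simp)
  have h1 : List.dropWhile PySem.Int.isIntSpace (c :: t) = c :: t := by
    rw [List.dropWhile_cons_of_neg (by simp [pv_notSpace c hd])]
  have h2 : List.dropWhile PySem.Int.isIntSpace (c :: t).reverse = (c :: t).reverse := by
    obtain ⟨d, r, hrev⟩ := List.exists_cons_of_ne_nil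
      (List.reverse_ne_nil_iff.mpr (by simp : c :: t ≠ []))
    have hdm : d ∈ c :: t := by
      have hr : d ∈ (c :: t).reverse := by rw [hrev]; simp
      rw [List.mem_reverse] at hr; exact hr
    rw [hrev, List.dropWhile_cons_of_neg (by simp [pv_notSpace d (hall d hdm)])]
  have hc1 : c ≠ '-' := by rintro rfl; revert hd; decide
  simp only [PySem.Int.ofChars?]
  rw [h1, h2, List.reverse_reverse]
  split
  all_goals first
    | apply pv_nonneg_shape
    | (next heq => injection heq with hh _; exact absurd hh hc1)

theorem pv_str_digits_nonneg (s : String) (h : PySem.Str.strIsdigit s = true) :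
    0 ≤ (PySem.Int.ofStr? s).getD 0 := by
  rw [PySem.Str.strIsdigit_eq] at h
  have := pv_digits_nonneg s.toList h
  simpa [PySem.Int.ofStr?_ofList] using this

-- range(0,n) filtered by divisibility-by-k equals range(0,n,k), for k > 0
theorem pv_filter_dvd (k n : Int) (hk : 0 < k) :
    (PySem.List.pyRange 0 n 1).filter (fun m => decide (PySem.Int.mod m k = 0))
      = PySem.List.pyRange 0 n k := by
  have hs1 : ((PySem.List.pyRange 0 n 1).filter
      (fun m => decide (PySem.Int.mod m k = 0))).Pairwise (· < ·) :=
    (PySem.List.pairwise_lt_pyRange_one 0 n).filter _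
  have hs2 : (PySem.List.pyRange 0 n k).Pairwise (· < ·) := by
    rw [PySem.List.pyRange_of_pos 0 n hk]
    refine List.Pairwise.map _ (fun a b (hab : a < b) => ?_) List.pairwise_lt_range
    have : (a : Int) < (b : Int) := by exact_mod_cast hab
    nlinarith
  have hperm : ((PySem.List.pyRange 0 n 1).filter
      (fun m => decide (PySem.Int.mod m k = 0))).Perm (PySem.List.pyRange 0 n k) := by
    refine (List.perm_ext_iff_of_nodup (hs1.imp ne_of_lt) (hs2.imp ne_of_lt)).mpr ?_
    intro x
    simp [List.mem_filter, PySem.List.mem_pyRange_one,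
      PySem.List.mem_pyRange_iff_of_pos hk, PySem.Int.mod_eq_zero_iff_dvd, and_comm, and_assoc]
  exact hperm.eq_of_pairwise (fun a b _ _ h1 h2 => absurd h2 (not_lt.mpr h1.le)) hs1 hs2

-- range(0,n) filtered by equality with v (0 ≤ v < n) is [v]
theorem pv_filter_eq (n v : Int) (h0 : 0 ≤ v) (hn : v < n) :
    (PySem.List.pyRange 0 n 1).filter (fun m => decide (m = v)) = [v] := by
  rw [PySem.List.pyRange_one_append 0 v n h0 hn.le,
      PySem.List.pyRange_one_cons hn, List.filter_append]
  have e1 : (PySem.List.pyRange 0 v 1).filter (fun m => decide (m = v)) = [] := by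
    rw [List.filter_eq_nil_iff]
    intro a ha
    have := (PySem.List.mem_pyRange_one).mp ha
    simp; omega
  have e2 : (PySem.List.pyRange (v+1) n 1).filter (fun m => decide (m = v)) = [] := by
    rw [List.filter_eq_nil_iff]
    intro a ha
    have := (PySem.List.mem_pyRange_one).mp ha
    simp; omega
  simp [e1, e2]

-- range with a negative step over an increasing interval is empty
theorem pv_pyRange_neg (k n : Int) (hk : k < 0) (hn : 0 < n) :
    PySem.List.pyRange 0 n k = [] := by
  simp [PySem.List.pyRange, hk.ne, not_lt.mpr hk.le, not_lt.mpr hn.le]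

-- flatMap over range(0,n) whose body fires only at v (0 ≤ v < n)
theorem pv_flatMap_single (n v : Int) (h0 : 0 ≤ v) (hn : v < n) (f : Int → List String) :
    (PySem.List.pyRange 0 n 1).flatMap (fun h => if h = v then f h else []) = f v := by
  rw [PySem.List.pyRange_one_append 0 v n h0 hn.le,
      PySem.List.pyRange_one_cons hn, List.flatMap_append, List.flatMap_cons]
  have e1 : (PySem.List.pyRange 0 v 1).flatMap (fun h => if h = v then f h else []) = [] := by
    rw [List.flatMap_eq_nil_iff]
    intro a ha
    have := (PySem.List.mem_pyRange_one).mp ha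
    rw [if_neg (by omega)]
  have e2 : (PySem.List.pyRange (v+1) n 1).flatMap (fun h => if h = v then f h else []) = [] := by
    rw [List.flatMap_eq_nil_iff]
    intro a ha
    have := (PySem.List.mem_pyRange_one).mp ha
    rw [if_neg (by omega)]
  simp [e1, e2]

-- ===== VERDICT (by name: the statements are the Claim_ definitions above) =====
set_option maxHeartbeats 1000000 in
theorem expand_schedule_py_spec : Claim_unchanged_expand_schedule_py := by
  intro schedule _ hpre hnd
  unfold expand_schedule_py expand_schedule_py_alt
  unfold Pre_expand_schedule_py at hpre
  unfold D_expand_schedule_py at hnd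
  set parts := PySem.Str.split₀ schedule with hparts
  by_cases hlen : parts.length < 2
  · simp only [if_pos hlen]
  · simp only [if_neg hlen]
    set minute := parts.getD 0 "" with hm
    set hour := parts.getD 1 "" with hh
    by_cases hsw : PySem.Str.startswith minute "*/" = true
    · simp only [hsw, if_pos]
      cases hiv : PySem.Int.ofStr? (PySem.Str.slice minute (some 2) none) with
      | none => exact absurd ⟨by omega, hsw, Or.inl hiv⟩ hpre
      | some k =>
        have hk0 : k ≠ 0 := fun h => hpre ⟨by omega, hsw, Or.inr (h ▸ hiv)⟩
        unfold pvGrid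
        rcases lt_or_gt_of_ne hk0 with hk | hk
        · simp [pv_pyRange_neg k 60 hk (by norm_num), decide_eq_false (not_lt.mpr hk.le)]
        · simp only [decide_eq_true hk, Bool.true_and, pv_filter_dvd k 60 hk]
    · have hswf : PySem.Str.startswith minute "*/" = false := by simpa using hsw
      simp only [hswf, Bool.false_eq_true, if_false]
      by_cases hdm : PySem.Str.strIsdigit minute = true
      · simp only [hdm, if_true]
        have hmv0 : 0 ≤ (PySem.Int.ofStr? minute).getD 0 := pv_str_digits_nonneg minute hdm
        have hnd' : ¬ (60 ≤ (PySem.Int.ofStr? minute).getD 0 ∨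
            (PySem.Str.strIsdigit hour = true ∧ 24 ≤ (PySem.Int.ofStr? hour).getD 0)) :=
          fun hd => hnd ⟨by omega, hswf, hdm, hd⟩
        push_neg at hnd'
        obtain ⟨hmv60, hhv⟩ := hnd'
        by_cases hdh : PySem.Str.strIsdigit hour = true
        · simp only [hdh, if_true]
          have hhv0 : 0 ≤ (PySem.Int.ofStr? hour).getD 0 := pv_str_digits_nonneg hour hdh
          have hhv24 : (PySem.Int.ofStr? hour).getD 0 < 24 := hhv hdh
          unfold pvGrid
          set hv := (PySem.Int.ofStr? hour).getD 0
          set mv := (PySem.Int.ofStr? minute).getD 0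
          clear_value hv mv
          have hinner : ∀ h : Int,
              ((PySem.List.pyRange 0 60 1).filter
                (fun m => decide (h = hv) && decide (m = mv))).map (fun m =>
                  String.ofList (pvFmt2 h ++ ':' :: pvFmt2 m))
              = if h = hv then [String.ofList (pvFmt2 h ++ ':' :: pvFmt2 mv)] else [] := by
            intro h
            by_cases hhh : h = hv
            · rw [if_pos hhh]
              simp only [decide_eq_true hhh, Bool.true_and, pv_filter_eq 60 mv hmv0 hmv60]
              simp
            · rw [if_neg hhh]
              simp [decide_eq_false hhh]
          calc [String.ofList (pvFmt2 hv ++ ':' :: pvFmt2 mv)]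
              = (fun h => [String.ofList (pvFmt2 h ++ ':' :: pvFmt2 mv)]) hv := rfl
            _ = (PySem.List.pyRange 0 24 1).flatMap (fun h =>
                  if h = hv then [String.ofList (pvFmt2 h ++ ':' :: pvFmt2 mv)] else []) :=
                (pv_flatMap_single 24 hv hhv0 hhv24 (fun h => [String.ofList (pvFmt2 h ++ ':' :: pvFmt2 mv)])).symm
            _ = _ := List.flatMap_congr (fun h _ => (hinner h).symm)
        · have hdhf : PySem.Str.strIsdigit hour = false := by simpa using hdh
          simp only [hdhf, Bool.false_eq_true, if_false]
          unfold pvGrid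
          simp only [Bool.true_and, pv_filter_eq 60 _ hmv0 hmv60]
          exact List.map_eq_flatMap
      · have hdmf : PySem.Str.strIsdigit minute = false := by simpa using hdm
        simp only [hdmf, Bool.false_eq_true, if_false]

theorem expand_schedule_py_changed : Claim_changed_expand_schedule_py := by
  unfold Claim_changed_expand_schedule_py; decide

set_option maxHeartbeats 1000000 in
theorem expand_schedule_py_tight : Claim_exact_expand_schedule_py := by
  intro schedule _ _ hd
  unfold D_expand_schedule_py at hd
  obtain ⟨hlen, hswf, hdm, hout⟩ := hd
  unfold expand_schedule_py expand_schedule_py_alt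
  set parts := PySem.Str.split₀ schedule with hparts
  by_cases hlen' : parts.length < 2
  · omega
  · simp only [if_neg hlen']
    set minute := parts.getD 0 "" with hm
    set hour := parts.getD 1 "" with hh
    simp only [hswf, Bool.false_eq_true, if_false]
    simp only [hdm, if_true]
    have hB : ∀ hok : Int → Bool,
        ((∀ h : Int, 0 ≤ h → h < 24 → hok h = true → False) ∨
          60 ≤ (PySem.Int.ofStr? minute).getD 0) →
        pvGrid hok (fun m => decide (m = (PySem.Int.ofStr? minute).getD 0)) = [] := by
      intro hok hcond
      unfold pvGrid
      rw [List.flatMap_eq_nil_iff]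
      intro h hhmem
      have hhb := PySem.List.mem_pyRange_one.mp hhmem
      rw [List.map_eq_nil_iff, List.filter_eq_nil_iff]
      intro a ha
      have hab := PySem.List.mem_pyRange_one.mp ha
      rcases hcond with hcond | hcond
      · simp only [Bool.and_eq_true, not_and]
        intro hfire _
        exact hcond h hhb.1 hhb.2 hfire
      · simp only [Bool.and_eq_true, decide_eq_true_eq, not_and]
        intro _ hma
        omega
    by_cases hdh : PySem.Str.strIsdigit hour = true
    · simp only [hdh, if_true]
      have hB0 : pvGrid (fun h => decide (h = (PySem.Int.ofStr? hour).getD 0))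
          (fun m => decide (m = (PySem.Int.ofStr? minute).getD 0)) = [] := by
        rcases hout with hmv60 | ⟨_, hhv24⟩
        · exact hB _ (Or.inr hmv60)
        · refine hB _ (Or.inl ?_)
          intro h h0 h24 hfire
          have := of_decide_eq_true hfire
          omega
      rw [hB0]
      simp
    · have hdhf : PySem.Str.strIsdigit hour = false := by simpa using hdh
      simp only [hdhf, Bool.false_eq_true, if_false]
      rcases hout with hmv60 | ⟨hdh', _⟩
      · rw [hB _ (Or.inr hmv60)]
        intro hcon
        have h1 : PySem.List.pyRange 0 24 1 = [] := List.map_eq_nil_iff.mp hcon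
        have h2 := PySem.List.length_pyRange_one 0 24
        rw [h1] at h2
        simp at h2
      · rw [hdh'] at hdhf
        exact absurd hdhf (by simp)
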